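-- pv_equiv track=rewrite | github.com/BGUO2025/dsc259r-2026-wi | labs/lab01/lab.py | exploded_numbers
-- ===== SOURCE A (Python) =====
-- def exploded_numbers(ints, n):
--     def expand_by_n(ints, n):
--         expanded = []
--         for num in ints:
--             curr_expand = [expanded_num for expanded_num in range(num - n, num + n + 1)]
--             expanded.extend(curr_expand)
--         return expanded
--
--     def max_num_digit(num):
--         exp = 1
--         while num >= (10 ** exp):
--             exp += 1
--         return exp
--
--     def expand_to_str(expanded, exp):
--         return list(map(lambda ele: str(ele).rjust(exp, '0'), expanded))
--
--     def create_separate_expand_str(strs, n):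
--         final_expanded = []
--         multiple = 1
--         start = 0
--         end = multiple * (n * 2 + 1)
--         while end <= len(strs):
--             curr_expand_str = ' '.join(strs[start : end])
--             final_expanded.append(curr_expand_str)
--             multiple += 1
--             start = end
--             end = multiple * (n * 2 + 1)
--         return final_expanded
--
--     expanded = expand_by_n(ints, n)
--     exp = max_num_digit(max(expanded))
--     expanded_str = expand_to_str(expanded, exp)
--     final_expanded = create_separate_expand_str(expanded_str, n)
--     return final_expanded
-- ===== SOURCE B (Python) =====
-- def exploded_numbers(ints, n):
--     ints = list(ints)
--     m = max(num + d for num in ints for d in range(-n, n + 1))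
--     width = 1
--     while m >= 10 ** width:
--         width += 1
--     return [' '.join(str(num + d).rjust(width, '0') for d in range(-n, n + 1))
--             for num in ints]
-- ===== Notes on version B (the rewrite author's own statement) =====
-- stated objective: simpler
-- what changed: B drops A's flatten-pad-then-rechunk pipeline (building one flat expanded list, padding it, then re-chunking it with multiple/start/end index arithmetic in a while loop): it computes the global width once from the max of the expanded values and then emits one joined string directly per input int.
import Mathlib
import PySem

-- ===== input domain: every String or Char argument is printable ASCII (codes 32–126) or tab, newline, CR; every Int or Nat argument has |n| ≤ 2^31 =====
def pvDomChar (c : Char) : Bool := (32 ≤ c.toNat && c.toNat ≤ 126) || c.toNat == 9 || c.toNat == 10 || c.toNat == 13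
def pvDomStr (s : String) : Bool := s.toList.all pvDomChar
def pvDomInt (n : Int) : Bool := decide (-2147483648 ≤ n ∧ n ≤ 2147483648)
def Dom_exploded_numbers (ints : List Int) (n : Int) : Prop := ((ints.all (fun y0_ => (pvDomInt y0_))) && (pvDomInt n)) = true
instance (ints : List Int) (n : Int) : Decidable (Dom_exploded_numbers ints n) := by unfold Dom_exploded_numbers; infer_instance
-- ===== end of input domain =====

-- B replaces A's flatten-pad-then-rechunk pipeline by one string per input int (simpler decomposition); same values everywhere A returns.

-- ===== PORT A =====
-- max_num_digit: 'exp = 1; while num >= 10**exp: exp += 1; return exp' (shared verbatim by B in Source B).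
-- Structural recursion on a fuel bound; fuel num.toNat+1 is never exhausted (10^exp > exp ≥ num stops the loop first).
def pvDigitsGo : Nat → Int → Nat → Nat
  | 0, _, exp => exp
  | fuel + 1, num, exp => if 10 ^ exp ≤ num then pvDigitsGo fuel num (exp + 1) else exp

def pvDigits (num : Int) : Nat := pvDigitsGo (num.toNat + 1) num 1

-- str(ele).rjust(exp, '0'): left-pad the decimal string with '0' to width exp (shared verbatim by B in Source B)
def pvRjust (w : Nat) (v : Int) : String :=
  String.ofList (List.replicate (w - (PySem.Int.toChars v).length) '0' ++ PySem.Int.toChars v)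

-- create_separate_expand_str's while loop (multiple/start/end index arithmetic); structural recursion on a fuel
-- bound, never exhausted where Python's loop terminates (each pass consumes ≥ 1 element of strs)
def pvChunkGo : Nat → List String → Int → Int → Int → List String → List String
  | 0, _, _, _, _, acc => acc
  | fuel + 1, strs, n, multiple, start, acc =>
    if multiple * (n * 2 + 1) ≤ PySem.List.len strs then
      pvChunkGo fuel strs n (multiple + 1) (multiple * (n * 2 + 1))
        (acc ++ [PySem.Str.join " " (PySem.List.slice strs (some start) (some (multiple * (n * 2 + 1))))])
    else acc

def pvChunk (strs : List String) (n : Int) : List String := pvChunkGo (strs.length + 1) strs n 1 0 []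

def exploded_numbers (ints : List Int) (n : Int) : List String :=
  match PySem.List.max? (ints.foldl (fun acc num => acc ++ PySem.List.pyRange (num - n) (num + n + 1) 1) []) (fun x => x) with
  | none => []   -- Python: max([]) raises ValueError; excluded by Pre_
  | some mx =>
    pvChunk ((ints.foldl (fun acc num => acc ++ PySem.List.pyRange (num - n) (num + n + 1) 1) []).map
      (fun ele => pvRjust (pvDigits mx) ele)) n

-- ===== PORT B =====
def exploded_numbers_alt (ints : List Int) (n : Int) : List String :=
  match PySem.List.max? (ints.flatMap (fun num => (PySem.List.pyRange (-n) (n + 1) 1).map (fun d => num + d))) (fun x => x) with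
  | none => []   -- Python: max over an empty generator raises ValueError; excluded by Pre_
  | some m =>
    ints.map (fun num => PySem.Str.join " " ((PySem.List.pyRange (-n) (n + 1) 1).map (fun d => pvRjust (pvDigits m) (num + d))))

-- ===== PRECONDITION & SPEC =====
-- Pre_ excludes exactly the inputs where Python A raises ValueError (max of an empty sequence): empty ints, or n < 0.
def Pre_exploded_numbers (ints : List Int) (n : Int) : Prop := ints ≠ [] ∧ 0 ≤ n
instance (ints : List Int) (n : Int) : Decidable (Pre_exploded_numbers ints n) := by unfold Pre_exploded_numbers; infer_instance
def pvWitness_exploded_numbers : List Int × Int := ([3, -7], 1)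

def Spec_exploded_numbers (ints : List Int) (n : Int) (out : List String) : Prop := out = exploded_numbers_alt ints n
instance (ints : List Int) (n : Int) (out : List String) : Decidable (Spec_exploded_numbers ints n out) := by unfold Spec_exploded_numbers; infer_instance

-- ===== CLAIM (what is proved, stated in full; the proofs are below) =====
def Claim_equal_exploded_numbers : Prop := ∀ (ints : List Int) (n : Int), Dom_exploded_numbers ints n → Pre_exploded_numbers ints n → Spec_exploded_numbers ints n (exploded_numbers ints n)

-- ===== LEMMAS AND PROOFS =====

-- shifting a 0-centred range: (range(-n, n+1)).map (num + ·) = range(num-n, num+n+1)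
theorem pvShift (num n : Int) :
    (PySem.List.pyRange (-n) (n + 1) 1).map (fun d => num + d)
      = PySem.List.pyRange (num - n) (num + n + 1) 1 := by
  rw [PySem.List.pyRange_one, PySem.List.pyRange_one, List.map_map]
  have : (n + 1 - -n).toNat = (num + n + 1 - (num - n)).toNat := by omega
  rw [this]
  apply List.map_congr_left
  intro k _
  simp only [Function.comp]
  ring

theorem pvLenLeFlatten (blocks : List (List String)) (h : ∀ b ∈ blocks, 1 ≤ b.length) :
    blocks.length ≤ blocks.flatten.length := by
  induction blocks with
  | nil => simp
  | cons b bs ih =>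
    have h1 := h b (List.mem_cons_self ..)
    have h2 := ih (fun b' hb' => h b' (List.mem_cons_of_mem _ hb'))
    simp only [List.flatten_cons, List.length_cons, List.length_append]
    omega

-- the chunking while-loop over a flat list of equal-length blocks produces one join per block
theorem pvChunk_blocks (n p : Int) (hp : p = n * 2 + 1) (hp1 : 1 ≤ p)
    (blocks : List (List String)) (hb : ∀ b ∈ blocks, (b.length : Int) = p) :
    ∀ (fuel : Nat) (done acc : List String) (multiple : Int), blocks.length < fuel → 1 ≤ multiple →
      (done.length : Int) = (multiple - 1) * p →
      pvChunkGo fuel (done ++ blocks.flatten) n multiple ((multiple - 1) * p) acc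
        = acc ++ blocks.map (PySem.Str.join " ") := by
  induction blocks with
  | nil =>
    intro fuel done acc multiple hf hm hd
    obtain ⟨fuel, rfl⟩ : ∃ f', fuel = f' + 1 := ⟨fuel - 1, by omega⟩
    rw [pvChunkGo]
    have hlen : (PySem.List.len (done ++ ([] : List (List String)).flatten) : Int) = (multiple - 1) * p := by
      simp [PySem.List.len_eq, hd]
    have hmul : (multiple - 1) * p < multiple * p := by nlinarith
    rw [if_neg (by rw [hlen, ← hp]; omega)]
    simp
  | cons b bs ih =>
    intro fuel done acc multiple hf hm hd
    obtain ⟨fuel, rfl⟩ : ∃ f', fuel = f' + 1 := ⟨fuel - 1, by omega⟩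
    have hbl : (b.length : Int) = p := hb b (by simp)
    have hbs : ∀ b' ∈ bs, (b'.length : Int) = p := fun b' h => hb b' (by simp [h])
    rw [pvChunkGo]
    have hflat : ((bs.flatten.length : Int)) ≥ 0 := by positivity
    have hlen : (PySem.List.len (done ++ (b :: bs).flatten) : Int)
        = (multiple - 1) * p + p + bs.flatten.length := by
      simp [PySem.List.len_eq, hd]; omega
    have hmp : multiple * p = (multiple - 1) * p + p := by ring
    rw [if_pos (by rw [hlen, ← hp, hmp]; omega)]
    -- the slice picks out exactly the block b
    have hstart : (0 : Int) ≤ (multiple - 1) * p := mul_nonneg (by omega) (by omega)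
    have hslice : PySem.List.slice (done ++ (b :: bs).flatten) (some ((multiple - 1) * p))
        (some (multiple * (n * 2 + 1))) = b := by
      rw [← hp, hmp]
      rw [PySem.List.slice_toNat]
      case ha => exact hstart
      case hb => omega
      have hdn : ((multiple - 1) * p).toNat = done.length := by omega
      rw [hdn]
      have htn2 : ((multiple - 1) * p + p).toNat - done.length = b.length := by omega
      rw [htn2]
      simp [List.flatten_cons]
    rw [hslice]
    have hrec := ih hbs fuel (done ++ b) (acc ++ [PySem.Str.join " " b]) (multiple + 1)
      (by simp at hf ⊢; omega) (by omega)
      (by simp only [List.length_append]; push_cast; rw [hbl]; linarith [hd])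
    have harr : done ++ b ++ bs.flatten = done ++ (b :: bs).flatten := by simp
    have hm1 : (multiple + 1 - 1) * p = multiple * p := by ring
    rw [harr, hm1, hp] at hrec
    rw [hrec]
    simp

theorem pvMain (ints : List Int) (n : Int) (hn : 0 ≤ n) (hne : ints ≠ []) :
    exploded_numbers ints n = exploded_numbers_alt ints n := by
  unfold exploded_numbers exploded_numbers_alt
  have hexp : ints.foldl (fun acc num => acc ++ PySem.List.pyRange (num - n) (num + n + 1) 1) []
      = ints.flatMap (fun num => PySem.List.pyRange (num - n) (num + n + 1) 1) :=
    PySem.List.foldl_append_eq_flatMap ..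
  have harg : ints.flatMap (fun num => (PySem.List.pyRange (-n) (n + 1) 1).map (fun d => num + d))
      = ints.flatMap (fun num => PySem.List.pyRange (num - n) (num + n + 1) 1) := by
    simp only [pvShift]
  rw [hexp, harg]
  cases hmx : PySem.List.max? (ints.flatMap fun num => PySem.List.pyRange (num - n) (num + n + 1) 1) (fun x => x) with
  | none => rfl
  | some m =>
    dsimp only
    set w := pvDigits m with hw
    have hflat : (ints.flatMap fun num => PySem.List.pyRange (num - n) (num + n + 1) 1).map (fun ele => pvRjust w ele)
        = (ints.map (fun num => (PySem.List.pyRange (num - n) (num + n + 1) 1).map (fun ele => pvRjust w ele))).flatten := by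
      simp [List.map_flatMap, List.flatMap_def, Function.comp_def]
    rw [hflat]
    have hb : ∀ b ∈ ints.map (fun num => (PySem.List.pyRange (num - n) (num + n + 1) 1).map (fun ele => pvRjust w ele)),
        (b.length : Int) = n * 2 + 1 := by
      intro b hbmem
      obtain ⟨num, _, rfl⟩ := List.mem_map.mp hbmem
      simp [PySem.List.length_pyRange_one]
      omega
    set blocks := ints.map (fun num => (PySem.List.pyRange (num - n) (num + n + 1) 1).map (fun ele => pvRjust w ele)) with hbk
    have hf : blocks.length < blocks.flatten.length + 1 := by
      have := pvLenLeFlatten blocks (by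
        intro b hbmem
        have := hb b hbmem
        omega)
      omega
    have hch := pvChunk_blocks n (n * 2 + 1) rfl (by omega) blocks hb
      (blocks.flatten.length + 1) [] [] 1 hf (by omega) (by simp)
    simp only [List.nil_append] at hch
    have h0 : ((1 : Int) - 1) * (n * 2 + 1) = 0 := by ring
    rw [h0] at hch
    simp only [pvChunk]
    rw [hch, List.map_map]
    apply List.map_congr_left
    intro num _
    simp only [Function.comp]
    rw [← pvShift num n, List.map_map]
    rfl
-- ===== VERDICT (by name: the statement is the Claim_ definition above) =====
theorem exploded_numbers_spec : Claim_equal_exploded_numbers := by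
  intro ints n _ hpre
  unfold Spec_exploded_numbers
  exact pvMain ints n hpre.2 hpre.1
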